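-- pv_equiv track=rewrite | github.com/yetanotherion/aoc | 2024/24/main.py | build_transitive_dependencies
-- ===== SOURCE A (Python) =====
-- def build_transitive_dependencies(dependencies, label):
--     res = set()
--     to_explore = [[label]]
--     while to_explore:
--         curr_path = to_explore.pop()
--         curr = curr_path[-1]
--         curr_deps = dependencies.get(curr, [])
--         for dep in curr_deps:
--             res.add(dep)
--             if dep in curr_path:
--                 return None
--             new_path = curr_path + [dep]
--             to_explore.append(new_path)
--     return res
-- ===== SOURCE B (Python) =====
-- def build_transitive_dependencies(dependencies, label):
--     def visit(path, res):
--         deps = dependencies.get(path[-1], [])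
--         for dep in deps:
--             res = res | {dep}
--             if dep in path:
--                 return None
--         for dep in reversed(deps):
--             res = visit(path + [dep], res)
--             if res is None:
--                 return None
--         return res
--     return visit([label], set())
-- ===== Notes on version B (the rewrite author's own statement) =====
-- stated objective: alternative
-- what changed: Replaces A's explicit worklist of whole paths (while-loop popping a stack of path lists) by a nested recursive visit function that threads the result set functionally and propagates None upward; same exploration and same exponential cost class.
import Mathlib
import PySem

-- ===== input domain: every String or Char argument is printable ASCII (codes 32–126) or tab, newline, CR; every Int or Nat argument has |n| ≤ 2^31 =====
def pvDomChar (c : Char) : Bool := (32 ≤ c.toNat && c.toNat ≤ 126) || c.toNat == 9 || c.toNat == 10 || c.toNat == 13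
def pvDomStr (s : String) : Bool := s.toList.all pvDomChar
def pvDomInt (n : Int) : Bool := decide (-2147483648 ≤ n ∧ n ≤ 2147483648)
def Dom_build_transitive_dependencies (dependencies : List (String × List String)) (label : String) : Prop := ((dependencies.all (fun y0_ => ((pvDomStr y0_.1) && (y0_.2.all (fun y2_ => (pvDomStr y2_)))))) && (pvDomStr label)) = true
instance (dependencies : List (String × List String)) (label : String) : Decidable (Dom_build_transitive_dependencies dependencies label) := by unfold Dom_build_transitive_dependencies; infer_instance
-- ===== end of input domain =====

-- B replaces A's explicit worklist of whole paths by direct structural recursion (a nested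
-- `visit` that threads the result set and propagates None); same exploration, same cost class.


-- fuel bound shared by both ports as a totality guard only: every path ever explored is
-- duplicate-free over the strings `label :: all dependency values`, so the number of loop
-- iterations / recursive calls is far below (n+2)^(n+2); the guard branch is never reached.
def pvFuel (dependencies : List (String × List String)) (label : String) : Nat :=
  ((label :: dependencies.flatMap Prod.snd).length + 2) ^ ((label :: dependencies.flatMap Prod.snd).length + 2)

-- ===== PORT A =====
-- A's inner `for dep in curr_deps` loop: res.add(dep); cycle check; push curr_path+[dep].
-- The stack is kept head-first (head = top = Python's to_explore[-1]).
def pvExpandA (path : List String) : List String → PySem.Set String → List (List String) → Option (PySem.Set String × List (List String))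
  | [], res, stack => some (res, stack)
  | dep :: rest, res, stack =>
    let res' := PySem.Set.add res dep
    if dep ∈ path then none
    else pvExpandA path rest res' ((path ++ [dep]) :: stack)

-- A's `while to_explore` loop; `fuel` is a totality guard (see pvFuel), checked only when the
-- Python loop would do another iteration.
def pvLoopA (dependencies : List (String × List String)) : Nat → List (List String) → PySem.Set String → Option (List String)
  | _, [], res => some res
  | 0, _ :: _, _ => none
  | fuel + 1, path :: stack, res =>
    let curr := (PySem.List.pyGet? path (-1)).getD ""   -- curr_path[-1]; paths are never empty
    let deps := PySem.Dict.getD ⟨dependencies⟩ curr []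
    match pvExpandA path deps res stack with
    | none => none
    | some (res', stack') => pvLoopA dependencies fuel stack' res'

def build_transitive_dependencies (dependencies : List (String × List String)) (label : String) : Option (List String) :=
  pvLoopA dependencies (pvFuel dependencies label) [[label]] PySem.Set.empty

-- ===== PORT B =====
-- Source B's first loop `for dep in deps: res = res | {dep}; if dep in path: return None`
def pvScanB (path : List String) : List String → PySem.Set String → Option (PySem.Set String)
  | [], res => some res
  | dep :: rest, res =>
    let res' := PySem.Set.add res dep
    if dep ∈ path then none
    else pvScanB path rest res'

-- Source B's `visit` (second loop = pvChildrenB, iterating reversed(deps) and recursing).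
-- Fuel is threaded through the recursion as a totality guard (one unit per `visit` entry);
-- the `min` in pvChildrenB only records fuel' ≤ fuel for the termination measure.
mutual
def pvVisitB (dependencies : List (String × List String)) (fuel : Nat) (path : List String) (res : PySem.Set String) : Nat × Option (PySem.Set String) :=
  match fuel with
  | 0 => (0, none)
  | fuel + 1 =>
    let curr := (PySem.List.pyGet? path (-1)).getD ""   -- path[-1]; paths are never empty
    let deps := PySem.Dict.getD ⟨dependencies⟩ curr []
    match pvScanB path deps res with
    | none => (fuel, none)
    | some res₁ => pvChildrenB dependencies fuel deps.reverse path res₁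
termination_by (fuel, 0)
decreasing_by apply Prod.Lex.left; omega

def pvChildrenB (dependencies : List (String × List String)) (fuel : Nat) (l : List String) (path : List String) (res : PySem.Set String) : Nat × Option (PySem.Set String) :=
  match l with
  | [] => (fuel, some res)
  | dep :: rest =>
    match pvVisitB dependencies fuel (path ++ [dep]) res with
    | (fuel', none) => (fuel', none)
    | (fuel', some res') => pvChildrenB dependencies (min fuel' fuel) rest path res'
termination_by (fuel, l.length + 1)
decreasing_by
  · apply Prod.Lex.right; omega
  · rcases Nat.lt_or_eq_of_le (Nat.min_le_right fuel' fuel) with h | h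
    · exact Prod.Lex.left _ _ h
    · rw [h]; apply Prod.Lex.right; simp [List.length_cons]
end

def build_transitive_dependencies_alt (dependencies : List (String × List String)) (label : String) : Option (List String) :=
  (pvVisitB dependencies (pvFuel dependencies label) [label] PySem.Set.empty).2

-- ===== PRECONDITION & SPEC =====
def Spec_build_transitive_dependencies (dependencies : List (String × List String)) (label : String) (out : Option (List String)) : Prop := out = build_transitive_dependencies_alt dependencies label
instance (dependencies : List (String × List String)) (label : String) (out : Option (List String)) : Decidable (Spec_build_transitive_dependencies dependencies label out) := by unfold Spec_build_transitive_dependencies; infer_instance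

-- ===== CLAIM (what is proved, stated in full; the proofs are below) =====
def Claim_equal_build_transitive_dependencies : Prop := ∀ (dependencies : List (String × List String)) (label : String), Dom_build_transitive_dependencies dependencies label → Spec_build_transitive_dependencies dependencies label (build_transitive_dependencies dependencies label)

-- ===== LEMMAS AND PROOFS =====

-- Proof-only: run B's `visit` over a whole stack of pending paths, threading the fuel.
def pvRunStack (dependencies : List (String × List String)) : Nat → List (List String) → PySem.Set String → Nat × Option (PySem.Set String)
  | fuel, [], res => (fuel, some res)
  | fuel, p :: rest, res =>
    match pvVisitB dependencies fuel p res with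
    | (fuel', none) => (fuel', none)
    | (fuel', some r) => pvRunStack dependencies fuel' rest r

theorem pv_fuel_le (d : List (String × List String)) (n : Nat) :
    (∀ path res, (pvVisitB d n path res).1 ≤ n) ∧
    (∀ l path res, (pvChildrenB d n l path res).1 ≤ n) := by
  induction n using Nat.strong_induction_on with
  | _ n ih =>
    have hv : ∀ path res, (pvVisitB d n path res).1 ≤ n := by
      intro path res
      match n with
      | 0 => simp [pvVisitB]
      | m + 1 =>
        rw [pvVisitB]
        cases hs : pvScanB path (PySem.Dict.getD ⟨d⟩ ((PySem.List.pyGet? path (-1)).getD "") []) res with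
        | none => simp
        | some r =>
          exact le_trans ((ih m (Nat.lt_succ_self m)).2 _ _ _) (Nat.le_succ m)
    refine ⟨hv, ?_⟩
    intro l
    induction l with
    | nil => intro path res; simp [pvChildrenB]
    | cons dep rest ihl =>
      intro path res
      rw [pvChildrenB]
      rcases hh : pvVisitB d n (path ++ [dep]) res with ⟨f', r⟩
      have hf' : f' ≤ n := by
        have := hv (path ++ [dep]) res; rw [hh] at this; exact this
      cases r with
      | none => simpa using hf'
      | some res' =>
        simp only []
        rcases (Nat.min_le_right f' n).lt_or_eq with hlt | heq
        · exact le_trans ((ih _ hlt).2 rest path res') (Nat.le_of_lt hlt)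
        · rw [heq]; exact ihl path res'

-- A's inner loop = B's first loop, plus the pushed child paths (in reverse, on top of the stack).
theorem pvExpandA_eq (path : List String) (deps : List String) (res : PySem.Set String) (stack : List (List String)) :
    pvExpandA path deps res stack =
      match pvScanB path deps res with
      | none => none
      | some r => some (r, deps.reverse.map (fun dep => path ++ [dep]) ++ stack) := by
  induction deps generalizing res stack with
  | nil => simp [pvExpandA, pvScanB]
  | cons dep rest ih =>
    simp only [pvExpandA, pvScanB]
    by_cases h : dep ∈ path
    · simp [h]
    · rw [if_neg h, if_neg h, ih]
      cases hs : pvScanB path rest (PySem.Set.add res dep) with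
      | none => simp
      | some r => simp [List.append_assoc]

-- B's second loop = running `visit` over the corresponding child paths.
theorem pvChildrenB_eq_runStack (dependencies : List (String × List String)) (l : List String) (fuel : Nat) (path : List String) (res : PySem.Set String) :
    pvChildrenB dependencies fuel l path res = pvRunStack dependencies fuel (l.map (fun dep => path ++ [dep])) res := by
  induction l generalizing fuel res with
  | nil => simp [pvChildrenB, pvRunStack]
  | cons dep rest ih =>
    rw [pvChildrenB]
    rcases hh : pvVisitB dependencies fuel (path ++ [dep]) res with ⟨f', r⟩
    have hf' : f' ≤ fuel := by
      have := (pv_fuel_le dependencies fuel).1 (path ++ [dep]) res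
      rw [hh] at this; exact this
    cases r with
    | none => simp [pvRunStack, hh]
    | some res' => simp [pvRunStack, hh, Nat.min_eq_left hf', ih]

theorem pvRunStack_append (dependencies : List (String × List String)) (X Y : List (List String)) (fuel : Nat) (res : PySem.Set String) :
    pvRunStack dependencies fuel (X ++ Y) res =
      match pvRunStack dependencies fuel X res with
      | (fuel', none) => (fuel', none)
      | (fuel', some r) => pvRunStack dependencies fuel' Y r := by
  induction X generalizing fuel res with
  | nil => simp [pvRunStack]
  | cons p X ih =>
    simp only [List.cons_append, pvRunStack]
    rcases h : pvVisitB dependencies fuel p res with ⟨f', r⟩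
    cases r <;> simp [ih]

-- Main coupling: A's worklist loop computes exactly B's recursion run over the stack.
theorem pvLoopA_eq_runStack (dependencies : List (String × List String)) (fuel : Nat) (stack : List (List String)) (res : PySem.Set String) :
    pvLoopA dependencies fuel stack res = (pvRunStack dependencies fuel stack res).2 := by
  induction fuel using Nat.strong_induction_on generalizing stack res with
  | _ fuel ih =>
    cases stack with
    | nil => cases fuel <;> simp [pvLoopA, pvRunStack]
    | cons path rest =>
      cases fuel with
      | zero => simp [pvLoopA, pvRunStack, pvVisitB]
      | succ f =>
        rw [pvLoopA, pvExpandA_eq]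
        cases hs : pvScanB path (PySem.Dict.getD ⟨dependencies⟩ ((PySem.List.pyGet? path (-1)).getD "") []) res with
        | none => simp [pvRunStack, pvVisitB, hs]
        | some res₁ =>
          simp only []
          rw [ih f (Nat.lt_succ_self f), pvRunStack_append]
          conv_rhs => rw [pvRunStack, pvVisitB]
          simp only [hs]
          rw [pvChildrenB_eq_runStack]

-- ===== VERDICT (by name: the statement is the Claim_ definition above) =====
theorem build_transitive_dependencies_spec : Claim_equal_build_transitive_dependencies := by
  intro dependencies label _
  unfold Spec_build_transitive_dependencies
  unfold build_transitive_dependencies build_transitive_dependencies_alt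
  rw [pvLoopA_eq_runStack]
  unfold pvRunStack
  rcases h : pvVisitB dependencies (pvFuel dependencies label) [label] PySem.Set.empty with ⟨f', r⟩
  cases r <;> simp [pvRunStack]
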